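-- pv_equiv track=rewrite | github.com/Pragmatismo/Pigrow | scripts/gui/test/make_water_display.py | make_col
-- ===== SOURCE A (Python) =====
-- def make_col(pump_names, pump_name):
--     index = pump_names.index(pump_name)
--     r_val = 100 + (index * 30)
--     g_val = 150
--     while r_val > 250:
--         r_val = r_val - 250
--         g_val = g_val + 50
--     while g_val > 250:
--         g_val = g_val - 250
--     b_val = 190
--     return (r_val, g_val, b_val)
-- ===== SOURCE B (Python) =====
-- def make_col(pump_names, pump_name):
--     r0 = 100 + pump_names.index(pump_name) * 30
--     k = (r0 - 1) // 250
--     return (r0 - 250 * k, (149 + 50 * k) % 250 + 1, 190)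
-- ===== Notes on version B (the rewrite author's own statement) =====
-- stated objective: simpler
-- what changed: Replaced the two repeated-subtraction while loops by closed-form floor-division/modulo arithmetic (k = (r0-1)//250, boundary-preserving (x-1)%250+1).
import Mathlib
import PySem

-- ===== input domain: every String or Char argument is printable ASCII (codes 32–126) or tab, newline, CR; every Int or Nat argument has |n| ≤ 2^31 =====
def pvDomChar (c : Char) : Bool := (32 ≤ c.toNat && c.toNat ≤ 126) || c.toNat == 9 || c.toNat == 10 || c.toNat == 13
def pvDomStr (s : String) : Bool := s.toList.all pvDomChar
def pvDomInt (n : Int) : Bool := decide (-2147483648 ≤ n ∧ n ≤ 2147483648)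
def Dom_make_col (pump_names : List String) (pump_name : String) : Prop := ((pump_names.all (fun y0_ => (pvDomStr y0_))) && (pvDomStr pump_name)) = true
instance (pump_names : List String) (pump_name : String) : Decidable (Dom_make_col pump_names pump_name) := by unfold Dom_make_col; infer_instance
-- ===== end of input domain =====

-- B replaces A's two repeated-subtraction while loops by closed-form floor-division/modulo arithmetic (objective: simpler).

-- ===== PORT A =====
-- while r_val > 250: r_val -= 250; g_val += 50
def pvLoopR (r g : Int) : Int × Int :=
  if 250 < r then pvLoopR (r - 250) (g + 50) else (r, g)
termination_by r.toNat
decreasing_by omega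

-- while g_val > 250: g_val -= 250
def pvLoopG (g : Int) : Int :=
  if 250 < g then pvLoopG (g - 250) else g
termination_by g.toNat
decreasing_by omega

def make_col (pump_names : List String) (pump_name : String) : Int × Int × Int :=
  let index : Int := ((PySem.List.index? pump_names pump_name).getD 0 : Nat)
  let r_val : Int := 100 + index * 30
  let g_val : Int := 150
  let rg := pvLoopR r_val g_val
  let g_val := pvLoopG rg.2
  let b_val : Int := 190
  (rg.1, g_val, b_val)

-- ===== PORT B =====
def make_col_alt (pump_names : List String) (pump_name : String) : Int × Int × Int :=
  let r0 : Int := 100 + ((PySem.List.index? pump_names pump_name).getD 0 : Nat) * 30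
  let k : Int := PySem.Int.floordiv (r0 - 1) 250
  (r0 - 250 * k, PySem.Int.mod (149 + 50 * k) 250 + 1, 190)

-- ===== PRECONDITION & SPEC =====
-- Pre_ excludes exactly the inputs where A raises ValueError (pump_name not in pump_names).
def Pre_make_col (pump_names : List String) (pump_name : String) : Prop := pump_name ∈ pump_names
instance (pump_names : List String) (pump_name : String) : Decidable (Pre_make_col pump_names pump_name) := by unfold Pre_make_col; infer_instance
def pvWitness_make_col : List String × String := (["a", "b"], "b")

def Spec_make_col (pump_names : List String) (pump_name : String) (out : Int × Int × Int) : Prop := out = make_col_alt pump_names pump_name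
instance (pump_names : List String) (pump_name : String) (out : Int × Int × Int) : Decidable (Spec_make_col pump_names pump_name out) := by unfold Spec_make_col; infer_instance

-- ===== CLAIM (what is proved, stated in full; the proofs are below) =====
def Claim_equal_make_col : Prop := ∀ (pump_names : List String) (pump_name : String), Dom_make_col pump_names pump_name → Pre_make_col pump_names pump_name → Spec_make_col pump_names pump_name (make_col pump_names pump_name)

-- ===== LEMMAS AND PROOFS =====
theorem pvLoopR_eq (r g : Int) (h : 0 < r) :
    pvLoopR r g = (r - 250 * ((r - 1) / 250), g + 50 * ((r - 1) / 250)) := by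
  induction r, g using pvLoopR.induct with
  | case1 r g hr ih =>
      rw [pvLoopR, if_pos hr, ih (by omega)]
      simp only [Prod.mk.injEq]
      omega
  | case2 r g hr =>
      rw [pvLoopR, if_neg hr]
      simp only [Prod.mk.injEq]
      omega

theorem pvLoopG_eq (g : Int) (h : 0 < g) : pvLoopG g = (g - 1) % 250 + 1 := by
  induction g using pvLoopG.induct with
  | case1 g hg ih =>
      rw [pvLoopG, if_pos hg, ih (by omega)]
      omega
  | case2 g hg =>
      rw [pvLoopG, if_neg hg]
      omega

-- ===== VERDICT (by name: the statement is the Claim_ definition above) =====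
theorem make_col_spec : Claim_equal_make_col := by
  intro pump_names pump_name _ _
  unfold Spec_make_col make_col make_col_alt
  simp only []
  generalize ((PySem.List.index? pump_names pump_name).getD 0 : Nat) = n
  have h0 : (0 : Int) < 100 + (n : Int) * 30 := by positivity
  have hk0 : 0 ≤ (100 + (n : Int) * 30 - 1) / 250 := by
    apply Int.ediv_nonneg <;> omega
  rw [pvLoopR_eq _ _ h0]
  rw [pvLoopG_eq _ (by omega)]
  rw [PySem.Int.floordiv_eq_ediv_of_pos (by omega), PySem.Int.mod_eq_emod_of_pos (by omega)]
  simp only [Prod.mk.injEq]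
  exact ⟨trivial, by omega, trivial⟩
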